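-- pv_equiv track=rewrite | github.com/pointhi/kicad-footprint-generator | scripts/tools/pad_number_generators.py | clockwise_dual
-- ===== SOURCE A (Python) =====
-- def _get_pin_cw(pincount, loc):
--     """Helper function to locate pin number for cw_dual.
--
--     Args:
--         pincount: Total number of pins
--         loc: Starting location
--
--     Returns:
--         pin_number: Starting pin number
--     """
--     pins_per_side = pincount // 2
--     if loc == "top_left":
--         return 0
--     elif loc == "bottom_left":
--         return pins_per_side * 2 + 1
--     elif loc == "bottom_right":
--         return pins_per_side
--     elif loc == "top_right":
--         return pins_per_side + 1
--     return 0
--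
-- def clockwise_dual(pincount, init=1, start="top_left", axis="x", **kwargs):
--     """Generator for dual row packages counting clockwise.
--
--     Args:
--         pincount: Total number of pins
--         init: Initial starting count (default: 1)
--         start: The starting corner, top/bottom - left/right
--         axis: Pin axis, either x or y. Is depended on num_pins_{x,y}
--         **kwargs: Other keyword arguments
--
--     Returns:
--         Iterator
--     """
--     i = _get_pin_cw(pincount, start)
--
--     if axis == "y":
--         pins = iter(range(pincount, 0, -1))
--     else:
--         pins = iter(range(pincount))
--
--     for ind in pins:
--         yield ((i + ind) % pincount) + init
-- ===== SOURCE B (Python) =====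
-- def clockwise_dual(pincount, init=1, start="top_left", axis="x", **kwargs):
--     """Clockwise dual-row pin numbering: the wrap-around is expressed as the
--     boundary between two plain ranges instead of a per-element modulo."""
--     if pincount <= 0:
--         return
--     half = pincount // 2
--     corner = {"bottom_left": half * 2 + 1, "bottom_right": half, "top_right": half + 1}
--     i0 = corner.get(start, 0) % pincount
--     if axis == "y":
--         for k in range(i0, -1, -1):
--             yield k + init
--         for k in range(pincount - 1, i0, -1):
--             yield k + init
--     else:
--         for k in range(i0, pincount):
--             yield k + init
--         for k in range(0, i0):
--             yield k + init
-- ===== Notes on version B (the rewrite author's own statement) =====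
-- stated objective: alternative
-- what changed: Instead of iterating a range and reducing every element modulo pincount, B computes the starting offset once (dict lookup, one modulo) and emits the cyclic sequence as two plain modulo-free ranges split at the wrap boundary, with an early return for pincount <= 0.
import Mathlib
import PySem

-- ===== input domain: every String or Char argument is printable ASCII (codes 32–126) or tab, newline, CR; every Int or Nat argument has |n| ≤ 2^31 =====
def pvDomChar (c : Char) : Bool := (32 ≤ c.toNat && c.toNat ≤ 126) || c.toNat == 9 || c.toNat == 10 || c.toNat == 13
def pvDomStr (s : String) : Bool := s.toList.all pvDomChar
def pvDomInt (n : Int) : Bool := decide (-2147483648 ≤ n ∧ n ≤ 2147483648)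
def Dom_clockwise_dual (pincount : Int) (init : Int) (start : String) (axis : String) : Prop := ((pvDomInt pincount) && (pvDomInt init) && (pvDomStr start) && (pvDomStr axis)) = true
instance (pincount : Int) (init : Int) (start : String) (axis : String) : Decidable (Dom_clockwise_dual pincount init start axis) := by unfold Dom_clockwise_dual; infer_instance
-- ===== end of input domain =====

-- One honest line: B replaces A's per-element modulo over one range by two modulo-free
-- ranges split at the wrap boundary (alternative decomposition, same O(n) cost).

-- ===== PORT A =====
-- helper _get_pin_cw
def pvGetPinCw (pincount : Int) (loc : String) : Int :=
  let pins_per_side := PySem.Int.floordiv pincount 2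
  if loc == "top_left" then 0
  else if loc == "bottom_left" then pins_per_side * 2 + 1
  else if loc == "bottom_right" then pins_per_side
  else if loc == "top_right" then pins_per_side + 1
  else 0

def clockwise_dual (pincount : Int) (init : Int) (start : String) (axis : String) : List Int :=
  let i := pvGetPinCw pincount start
  let pins := if axis == "y" then PySem.List.pyRange pincount 0 (-1)
              else PySem.List.pyRange 0 pincount 1
  pins.map (fun ind => PySem.Int.mod (i + ind) pincount + init)

-- ===== PORT B =====
def clockwise_dual_alt (pincount : Int) (init : Int) (start : String) (axis : String) : List Int :=
  if pincount ≤ 0 then []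
  else
    let half := PySem.Int.floordiv pincount 2
    let corner : PySem.Dict String Int :=
      PySem.Dict.ofList [("bottom_left", half * 2 + 1), ("bottom_right", half), ("top_right", half + 1)]
    let i0 := PySem.Int.mod (corner.getD start 0) pincount
    if axis == "y" then
      (PySem.List.pyRange i0 (-1) (-1)).map (· + init)
        ++ (PySem.List.pyRange (pincount - 1) i0 (-1)).map (· + init)
    else
      (PySem.List.pyRange i0 pincount 1).map (· + init)
        ++ (PySem.List.pyRange 0 i0 1).map (· + init)

-- ===== PRECONDITION & SPEC =====
def Spec_clockwise_dual (pincount : Int) (init : Int) (start : String) (axis : String) (out : List Int) : Prop := out = clockwise_dual_alt pincount init start axis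
instance (pincount : Int) (init : Int) (start : String) (axis : String) (out : List Int) : Decidable (Spec_clockwise_dual pincount init start axis out) := by unfold Spec_clockwise_dual; infer_instance

-- ===== CLAIM (what is proved, stated in full; the proofs are below) =====
def Claim_equal_clockwise_dual : Prop := ∀ (pincount : Int) (init : Int) (start : String) (axis : String), Dom_clockwise_dual pincount init start axis → Spec_clockwise_dual pincount init start axis (clockwise_dual pincount init start axis)

-- ===== LEMMAS AND PROOFS =====

-- B's dict lookup computes the same corner offset as A's if-chain.
theorem corner_getD_eq (pincount : Int) (start : String) :
    (PySem.Dict.ofList [("bottom_left", PySem.Int.floordiv pincount 2 * 2 + 1),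
        ("bottom_right", PySem.Int.floordiv pincount 2),
        ("top_right", PySem.Int.floordiv pincount 2 + 1)]).getD start 0
      = pvGetPinCw pincount start := by
  have h : (PySem.Dict.ofList [("bottom_left", PySem.Int.floordiv pincount 2 * 2 + 1),
        ("bottom_right", PySem.Int.floordiv pincount 2),
        ("top_right", PySem.Int.floordiv pincount 2 + 1)])
      = (((PySem.Dict.empty.insert "bottom_left" (PySem.Int.floordiv pincount 2 * 2 + 1)).insert
          "bottom_right" (PySem.Int.floordiv pincount 2)).insert
          "top_right" (PySem.Int.floordiv pincount 2 + 1)) := rfl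
  rw [h]
  simp only [PySem.Dict.getD_insert, PySem.Dict.getD_empty, pvGetPinCw, beq_iff_eq]
  split_ifs with h1 h2 h3 h4 h5 h6 h7 <;> simp_all

-- adding a multiple of p, then reducing mod p, only sees the offset mod p
theorem pv_mod_shift (p i t : Int) (hp : 0 < p) :
    PySem.Int.mod (i + t) p = (PySem.Int.mod i p + t) % p := by
  rw [PySem.Int.mod_eq_emod_of_pos hp, PySem.Int.mod_eq_emod_of_pos hp]
  have hdecomp : i + t = (i % p + t) + p * (i / p) := by
    have h := Int.emod_add_mul_ediv i p
    linarith
  rw [hdecomp, Int.add_mul_emod_self_left]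

-- ascending case (axis != "y"): A's modulo-reduced range is B's two plain ranges
theorem asc_split (p i init : Int) (hp : 0 < p) :
    (PySem.List.pyRange 0 p 1).map (fun ind => PySem.Int.mod (i + ind) p + init)
      = (PySem.List.pyRange (PySem.Int.mod i p) p 1).map (fun x => x + init)
        ++ (PySem.List.pyRange 0 (PySem.Int.mod i p) 1).map (fun x => x + init) := by
  set i0 := PySem.Int.mod i p with hi0
  have hmod : i0 = i % p := by rw [hi0]; exact PySem.Int.mod_eq_emod_of_pos hp
  have h0 : 0 ≤ i0 := by rw [hmod]; exact Int.emod_nonneg i (by omega)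
  have hlt : i0 < p := by rw [hmod]; exact Int.emod_lt_of_pos i hp
  rw [PySem.List.pyRange_one, PySem.List.pyRange_one, PySem.List.pyRange_one]
  have hsum : (p - 0).toNat = (p - i0).toNat + (i0 - 0).toNat := by omega
  rw [hsum, List.range_add]
  simp only [List.map_append, List.map_map]
  congr 1
  · apply List.map_congr_left
    intro k hk
    have hk' : (k : Int) < p - i0 := by
      have := List.mem_range.mp hk; omega
    simp only [Function.comp_apply]
    rw [pv_mod_shift p i _ hp, ← hi0]
    have harg : i0 + (0 + (k : Int)) = i0 + k := by ring
    rw [harg, Int.emod_eq_of_lt (by omega) (by omega)]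
  · apply List.map_congr_left
    intro k hk
    have hk' : (k : Int) < i0 - 0 := by
      have := List.mem_range.mp hk; omega
    simp only [Function.comp_apply]
    rw [pv_mod_shift p i _ hp, ← hi0]
    have harg : i0 + (0 + (((p - i0).toNat + k : Nat) : Int)) = (k : Int) + p * 1 := by
      push_cast; omega
    rw [harg, Int.add_mul_emod_self_left, Int.emod_eq_of_lt (by omega) (by omega)]
    ring

-- descending case (axis == "y")
theorem desc_split (p i init : Int) (hp : 0 < p) :
    (PySem.List.pyRange p 0 (-1)).map (fun ind => PySem.Int.mod (i + ind) p + init)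
      = (PySem.List.pyRange (PySem.Int.mod i p) (-1) (-1)).map (fun x => x + init)
        ++ (PySem.List.pyRange (p - 1) (PySem.Int.mod i p) (-1)).map (fun x => x + init) := by
  set i0 := PySem.Int.mod i p with hi0
  have hmod : i0 = i % p := by rw [hi0]; exact PySem.Int.mod_eq_emod_of_pos hp
  have h0 : 0 ≤ i0 := by rw [hmod]; exact Int.emod_nonneg i (by omega)
  have hlt : i0 < p := by rw [hmod]; exact Int.emod_lt_of_pos i hp
  rw [PySem.List.pyRange_neg_one, PySem.List.pyRange_neg_one, PySem.List.pyRange_neg_one]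
  have hsum : (p - 0).toNat = (i0 - -1).toNat + (p - 1 - i0).toNat := by omega
  rw [hsum, List.range_add]
  simp only [List.map_append, List.map_map]
  congr 1
  · apply List.map_congr_left
    intro k hk
    have hk' : (k : Int) < i0 - -1 := by
      have := List.mem_range.mp hk; omega
    simp only [Function.comp_apply]
    rw [pv_mod_shift p i _ hp, ← hi0]
    have harg : i0 + (p - (k : Int)) = (i0 - k) + p * 1 := by ring
    rw [harg, Int.add_mul_emod_self_left, Int.emod_eq_of_lt (by omega) (by omega)]
  · apply List.map_congr_left
    intro k hk
    have hk' : (k : Int) < p - 1 - i0 := by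
      have := List.mem_range.mp hk; omega
    simp only [Function.comp_apply]
    rw [pv_mod_shift p i _ hp, ← hi0]
    have harg : i0 + (p - (((i0 - -1).toNat + k : Nat) : Int)) = p - 1 - (k : Int) := by
      push_cast; omega
    rw [harg, Int.emod_eq_of_lt (by omega) (by omega)]

-- ===== VERDICT (by name: the statement is the Claim_ definition above) =====
theorem clockwise_dual_spec : Claim_equal_clockwise_dual := by
  intro pincount init start axis _
  unfold Spec_clockwise_dual
  simp only [clockwise_dual, clockwise_dual_alt]
  by_cases hp : pincount <= 0
  · rw [if_pos hp]
    simp [PySem.List.pyRange_neg_one_eq_nil hp, PySem.List.pyRange_one_eq_nil hp]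
  · have hp' : 0 < pincount := by omega
    rw [if_neg hp, corner_getD_eq]
    by_cases hy : (axis == "y") = true
    · simp only [if_pos hy]
      exact desc_split pincount (pvGetPinCw pincount start) init hp'
    · simp only [if_neg hy]
      exact asc_split pincount (pvGetPinCw pincount start) init hp'
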